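-- pv_equiv track=rewrite | github.com/sumitkumar1233edeedad/python_probemsolving | 25searchforletters.py | find
-- ===== SOURCE A (Python) =====
-- def find(st):
--     # Convert the input string to lowercase for case-insensitive comparison
--     st = st.lower()
--     # Create a list of all lowercase alphabet letters
--     l = [chr(i) for i in range(ord('a'), ord('z')+1)]
--     m = ''
--     # For each letter, check if it is present in the input string
--     for i in range(len(l)):
--         if l[i] in st:
--             m += "1"  # Letter is present
--         else:
--             m += '0' # Letter is absent
--
--     return m
-- ===== SOURCE B (Python) =====
-- def find(st):
--     flags = [False] * 26
--     for c in st.lower():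
--         if 'a' <= c <= 'z':
--             flags[ord(c) - ord('a')] = True
--     return ''.join('1' if f else '0' for f in flags)
-- ===== Notes on version B (the rewrite author's own statement) =====
-- stated objective: alternative
-- what changed: A makes 26 substring scans over the input (one per letter); B takes a single pass over the lowered string, marking a 26-slot bucket array, then renders the flags.
import Mathlib
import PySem

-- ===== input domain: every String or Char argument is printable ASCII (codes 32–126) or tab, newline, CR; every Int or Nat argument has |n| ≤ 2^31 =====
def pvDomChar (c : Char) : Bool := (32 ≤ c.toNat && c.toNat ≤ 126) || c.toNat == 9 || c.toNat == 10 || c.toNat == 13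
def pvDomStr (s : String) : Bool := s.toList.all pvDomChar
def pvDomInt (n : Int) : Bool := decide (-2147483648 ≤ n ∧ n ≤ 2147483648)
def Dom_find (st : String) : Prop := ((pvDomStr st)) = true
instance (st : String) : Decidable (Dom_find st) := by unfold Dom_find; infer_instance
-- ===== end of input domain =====

-- B replaces A's 26 substring scans over the string by one pass with a 26-slot bucket array (alternative decomposition).

-- ===== PORT A =====
def find (st : String) : String :=
  let st' := PySem.Str.lower st
  -- l = [chr(i) for i in range(ord('a'), ord('z')+1)]; Char.ofNat is exact for 97..122
  let l : List Char := (PySem.List.pyRange 97 123 1).map (fun i => Char.ofNat i.toNat)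
  (PySem.List.pyRange 0 (l.length : Int) 1).foldl (fun m i =>
    match PySem.List.pyGet? l i with
    | some c => if PySem.Str.isIn (String.ofList [c]) st' then m ++ "1" else m ++ "0"
    | none => m) ""   -- none unreachable: i ∈ range(len(l))

-- ===== PORT B =====
def find_alt (st : String) : String :=
  let flags : List Bool := (PySem.Str.lower st).toList.foldl
    (fun (fl : List Bool) c =>
      if 'a' ≤ c ∧ c ≤ 'z' then fl.set (c.toNat - 97) true else fl)
    (List.replicate 26 false)
  String.ofList (flags.map (fun f => if f then '1' else '0'))

-- ===== PRECONDITION & SPEC =====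
def Spec_find (st : String) (out : String) : Prop := out = find_alt st
instance (st : String) (out : String) : Decidable (Spec_find st out) := by unfold Spec_find; infer_instance

-- ===== CLAIM (what is proved, stated in full; the proofs are below) =====
def Claim_equal_find : Prop := ∀ (st : String), Dom_find st → Spec_find st (find st)

-- ===== LEMMAS AND PROOFS =====

-- B's loop step
def pvStep (fl : List Bool) (c : Char) : List Bool :=
  if 'a' ≤ c ∧ c ≤ 'z' then fl.set (c.toNat - 97) true else fl

def pvPred (j : Nat) (c : Char) : Bool :=
  decide ('a' ≤ c ∧ c ≤ 'z') && (c.toNat - 97 == j)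

lemma pvStep_length (fl : List Bool) (c : Char) : (pvStep fl c).length = fl.length := by
  unfold pvStep; split <;> simp

lemma pvFoldl_length (cs : List Char) (fl : List Bool) :
    (cs.foldl pvStep fl).length = fl.length := by
  induction cs generalizing fl with
  | nil => rfl
  | cons c cs ih => simp [List.foldl, ih, pvStep_length]

lemma char_le_iff (a b : Char) : a ≤ b ↔ a.toNat ≤ b.toNat := by
  constructor <;> (intro h; exact h)

lemma pvFlags_getElem (cs : List Char) (fl : List Bool) (j : Nat) (hj : j < fl.length) :
    (cs.foldl pvStep fl)[j]? = some (fl[j] || cs.any (pvPred j)) := by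
  induction cs generalizing fl with
  | nil => simp [List.getElem?_eq_getElem hj]
  | cons c cs ih =>
    have hj' : j < (pvStep fl c).length := by rw [pvStep_length]; exact hj
    rw [List.foldl_cons, ih _ hj']
    congr 1
    have hstep : (pvStep fl c)[j] = (fl[j] || pvPred j c) := by
      unfold pvStep pvPred
      by_cases h : 'a' ≤ c ∧ c ≤ 'z'
      · have h97 : 97 ≤ c.toNat := (char_le_iff 'a' c).mp h.1
        simp only [if_pos h, decide_eq_true_iff.mpr h, Bool.true_and]
        by_cases hcj : c.toNat - 97 = j
        · have : j < fl.length := hj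
          simp [List.getElem_set, hcj]
        · simp [beq_iff_eq, hcj]
      · simp [h]
    rw [hstep, List.any_cons]
    cases hfl : fl[j] <;> cases hp : pvPred j c <;> simp_all

lemma pvFold_closed (cs : List Char) :
    cs.foldl pvStep (List.replicate 26 false) = (List.range 26).map (fun j => cs.any (pvPred j)) := by
  apply List.ext_getElem?
  intro j
  by_cases hj : j < 26
  · rw [pvFlags_getElem cs _ j (by simpa using hj)]
    rw [List.getElem_replicate]
    simp [hj]
  · have h1 : (cs.foldl pvStep (List.replicate 26 false)).length ≤ j := by
      rw [pvFoldl_length]; simpa using Nat.le_of_not_lt hj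
    rw [List.getElem?_eq_none h1, List.getElem?_eq_none (by simpa using Nat.le_of_not_lt hj)]

lemma singleton_infix_iff (c : Char) (s : List Char) : [c] <:+: s ↔ c ∈ s := by
  constructor
  · intro h; exact h.subset (by simp)
  · intro h
    obtain ⟨l1, l2, rfl⟩ := List.append_of_mem h
    exact ⟨l1, l2, by simp⟩

lemma pvKey (s : List Char) (ch : Char) (j : Nat) (hch : ch.toNat = 97 + j) (hj : j ≤ 25) :
    PySem.Chars.isIn [ch] s = s.any (pvPred j) := by
  rw [Bool.eq_iff_iff, PySem.Chars.isIn_iff_infix, singleton_infix_iff, List.any_eq_true]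
  constructor
  · intro h
    refine ⟨ch, h, ?_⟩
    unfold pvPred
    have hz : ('z').toNat = 122 := by decide
    have ha : ('a').toNat = 97 := by decide
    have h1 : 'a' ≤ ch := (char_le_iff 'a' ch).mpr (by omega)
    have h2 : ch ≤ 'z' := (char_le_iff ch 'z').mpr (by omega)
    simp [h1, h2, hch]
  · rintro ⟨c, hc, hp⟩
    unfold pvPred at hp
    simp only [Bool.and_eq_true, decide_eq_true_eq, beq_iff_eq] at hp
    obtain ⟨⟨hA, hZ⟩, hidx⟩ := hp
    have h97 : 97 ≤ c.toNat := (char_le_iff 'a' c).mp hA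
    have : c.toNat = ch.toNat := by omega
    have : c = ch := Char.ext (UInt32.toNat_inj.mp this)
    rwa [this] at hc

lemma pvFoldA (letters : List Char) (s : List Char) (m : String) :
    (letters.foldl (fun m c => if PySem.Chars.isIn [c] s then m ++ "1" else m ++ "0") m).toList
      = m.toList ++ letters.map (fun c => if PySem.Chars.isIn [c] s then '1' else '0') := by
  induction letters generalizing m with
  | nil => simp
  | cons c cs ih =>
    rw [List.foldl_cons, ih]
    by_cases h : PySem.Chars.isIn [c] s = true <;> simp [h]


def pvLetters : List Char := ['a', 'b', 'c', 'd', 'e', 'f', 'g', 'h', 'i', 'j', 'k', 'l', 'm', 'n', 'o', 'p', 'q', 'r', 's', 't', 'u', 'v', 'w', 'x', 'y', 'z']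

lemma pvFoldIdx (l : List Char) (G : String → Char → String) (k : Nat) (m : String) :
    (PySem.List.pyRange (k : Int) (l.length : Int) 1).foldl (fun m i =>
      match PySem.List.pyGet? l i with
      | some c => G m c
      | none => m) m = (l.drop k).foldl G m := by
  by_cases hk : k < l.length
  · rw [PySem.List.pyRange_one_cons (by exact_mod_cast hk)]
    rw [List.foldl_cons]
    have hget : PySem.List.pyGet? l (k : Int) = some l[k] := by
      simp [List.getElem?_eq_getElem hk]
    rw [hget]
    have : ((k : Int) + 1) = ((k + 1 : Nat) : Int) := by push_cast; ring
    rw [this, pvFoldIdx l G (k + 1) (G m l[k])]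
    rw [List.drop_eq_getElem_cons hk, List.foldl_cons]
  · rw [PySem.List.pyRange_one_eq_nil (by exact_mod_cast Nat.le_of_not_lt hk)]
    rw [List.drop_eq_nil_of_le (Nat.le_of_not_lt hk)]
    rfl
  termination_by l.length - k

lemma pvKeyAll (s : List Char) :
    pvLetters.map (fun c => if PySem.Chars.isIn [c] s then '1' else '0')
      = (List.range 26).map (fun j => if s.any (pvPred j) then '1' else '0') := by
  have hr : List.range 26 = [0,1,2,3,4,5,6,7,8,9,10,11,12,13,14,15,16,17,18,19,20,21,22,23,24,25] := by decide
  rw [hr]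
  simp only [pvLetters, List.map]
  rw [pvKey s 'a' 0 (by decide) (by decide), pvKey s 'b' 1 (by decide) (by decide), pvKey s 'c' 2 (by decide) (by decide), pvKey s 'd' 3 (by decide) (by decide), pvKey s 'e' 4 (by decide) (by decide), pvKey s 'f' 5 (by decide) (by decide), pvKey s 'g' 6 (by decide) (by decide), pvKey s 'h' 7 (by decide) (by decide), pvKey s 'i' 8 (by decide) (by decide), pvKey s 'j' 9 (by decide) (by decide), pvKey s 'k' 10 (by decide) (by decide), pvKey s 'l' 11 (by decide) (by decide), pvKey s 'm' 12 (by decide) (by decide), pvKey s 'n' 13 (by decide) (by decide), pvKey s 'o' 14 (by decide) (by decide), pvKey s 'p' 15 (by decide) (by decide), pvKey s 'q' 16 (by decide) (by decide), pvKey s 'r' 17 (by decide) (by decide), pvKey s 's' 18 (by decide) (by decide), pvKey s 't' 19 (by decide) (by decide), pvKey s 'u' 20 (by decide) (by decide), pvKey s 'v' 21 (by decide) (by decide), pvKey s 'w' 22 (by decide) (by decide), pvKey s 'x' 23 (by decide) (by decide), pvKey s 'y' 24 (by decide) (by decide), pvKey s 'z' 25 (by decide) (by decide)]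

-- ===== VERDICT (by name: the statement is the Claim_ definition above) =====
theorem find_spec : Claim_equal_find := by
  intro st _
  unfold Spec_find
  apply String.toList_injective
  have hl : (PySem.List.pyRange 97 123 1).map (fun i => Char.ofNat i.toNat) = pvLetters := by decide
  have hA : (find st).toList
      = pvLetters.map (fun c => if PySem.Chars.isIn [c] (PySem.Str.lower st).toList then '1' else '0') := by
    simp only [find, hl]
    have h0 : ((0 : Int)) = ((0 : Nat) : Int) := rfl
    rw [h0, pvFoldIdx pvLetters
      (fun m c => if PySem.Str.isIn (String.ofList [c]) (PySem.Str.lower st) then m ++ "1" else m ++ "0") 0 ""]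
    rw [List.drop_zero]
    have hfun : (fun (m : String) (c : Char) =>
        if PySem.Str.isIn (String.ofList [c]) (PySem.Str.lower st) then m ++ "1" else m ++ "0")
        = (fun (m : String) (c : Char) =>
        if PySem.Chars.isIn [c] (PySem.Str.lower st).toList then m ++ "1" else m ++ "0") := by
      funext m c; simp
    rw [hfun, pvFoldA]
    simp
  have hB : (find_alt st).toList
      = (List.range 26).map (fun j => if (PySem.Str.lower st).toList.any (pvPred j) then '1' else '0') := by
    simp only [find_alt]
    have hstep : (fun (fl : List Bool) (c : Char) =>
        if 'a' ≤ c ∧ c ≤ 'z' then fl.set (c.toNat - 97) true else fl) = pvStep := rfl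
    rw [hstep, pvFold_closed]
    simp [List.map_map, Function.comp]
  rw [hA, hB, pvKeyAll]
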